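-- pv_equiv track=rewrite | github.com/Nishat30/gfg160 | Difficulty: Medium/Make Matrix Beautiful/make-matrix-beautiful.py | balanceSums
-- ===== SOURCE A (Python) =====
-- def balanceSums(mat):
--     n = len(mat)
--     if n == 0:
--        return 0
--
--     max_row_sum = 0
--     for i in range(n):
--         current_row_sum = 0
--         for j in range(n):
--             current_row_sum += mat[i][j]
--
--         if current_row_sum > max_row_sum:
--             max_row_sum = current_row_sum
--
--     max_col_sum = 0
--     for j in range(n):
--         current_col_sum = 0
--         for i in range(n):
--             current_col_sum += mat[i][j]
--
--         if current_col_sum > max_col_sum: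
--             max_col_sum = current_col_sum
--
--     target_sum = max(max_row_sum, max_col_sum)
--
--     total_operations = 0
--     for i in range(n):
--         current_row_sum = 0
--         for j in range(n):
--             current_row_sum += mat[i][j]
--
--         total_operations += (target_sum - current_row_sum)
--
--     return total_operations
-- ===== SOURCE B (Python) =====
-- def balanceSums(mat):
--     n = len(mat)
--     if n == 0:
--         return 0
--     col = [0] * n
--     best = 0
--     total = 0
--     for row in mat:
--         r = row[:n]
--         s = sum(r)
--         col = [c + v for c, v in zip(col, r)]
--         total += s
--         if s > best:
--             best = s
--     return n * max(best, max(col)) - total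
-- ===== Notes on version B (the rewrite author's own statement) =====
-- stated objective: faster
-- what changed: A makes three separate nested index-loop scans (row maxima, column maxima, and a third full re-summation of every row); B makes one pass over the rows maintaining a column-sum vector, the running row-sum maximum and the grand total, and replaces the third loop by the closed form n*target - total.
import Mathlib
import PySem

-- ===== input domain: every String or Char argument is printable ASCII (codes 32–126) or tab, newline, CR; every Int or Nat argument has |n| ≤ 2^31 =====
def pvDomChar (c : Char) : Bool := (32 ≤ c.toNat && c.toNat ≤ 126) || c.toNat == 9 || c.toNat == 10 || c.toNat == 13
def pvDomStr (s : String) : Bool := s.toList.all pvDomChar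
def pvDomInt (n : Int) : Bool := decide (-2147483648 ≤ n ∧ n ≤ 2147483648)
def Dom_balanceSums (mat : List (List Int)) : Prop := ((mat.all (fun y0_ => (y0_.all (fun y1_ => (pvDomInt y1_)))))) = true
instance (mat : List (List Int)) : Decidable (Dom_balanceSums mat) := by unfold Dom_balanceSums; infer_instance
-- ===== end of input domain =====

-- B replaces A's three separate nested index scans by ONE pass over the rows that maintains a
-- column-sum vector, a running row-sum maximum and the grand total, and computes the answer by
-- the closed form n*target - total instead of A's third accumulation loop (objective: faster by
-- a constant factor / simpler structure; same O(n^2) asymptotics).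

-- ===== PORT A =====
def balanceSums (mat : List (List Int)) : Int :=
  let n : Nat := mat.length
  if n = 0 then 0
  else
    -- max_row_sum loop
    let maxRow := (PySem.List.pyRange 0 (n : Int)).foldl (fun m i =>
        let s := (PySem.List.pyRange 0 (n : Int)).foldl
            (fun acc j => acc + PySem.List.pyGetD (PySem.List.pyGetD mat i []) j 0) 0
        if s > m then s else m) 0
    -- max_col_sum loop
    let maxCol := (PySem.List.pyRange 0 (n : Int)).foldl (fun m j =>
        let s := (PySem.List.pyRange 0 (n : Int)).foldl
            (fun acc i => acc + PySem.List.pyGetD (PySem.List.pyGetD mat i []) j 0) 0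
        if s > m then s else m) 0
    let target := max maxRow maxCol
    -- total_operations loop
    (PySem.List.pyRange 0 (n : Int)).foldl (fun t i =>
        let s := (PySem.List.pyRange 0 (n : Int)).foldl
            (fun acc j => acc + PySem.List.pyGetD (PySem.List.pyGetD mat i []) j 0) 0
        t + (target - s)) 0

-- ===== PORT B =====
def balanceSums_alt (mat : List (List Int)) : Int :=
  let n : Nat := mat.length
  if n = 0 then 0
  else
    let st := mat.foldl
      (fun (st : List Int × Int × Int) row =>
        let r := PySem.List.slice row none (some (n : Int))   -- row[:n]
        let s := r.sum
        ((st.1.zip r).map (fun p => p.1 + p.2),               -- col = [c+v for c,v in zip(col,r)]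
          st.2.1 + s,                                         -- total += s
          if s > st.2.2 then s else st.2.2))                  -- if s > best: best = s
      (List.replicate n 0, 0, 0)
    let maxCol := (PySem.List.max? st.1 (fun x => x)).getD 0  -- max(col); col is nonempty here
    (n : Int) * max st.2.2 maxCol - st.2.1

-- ===== PRECONDITION & SPEC =====
-- Pre_ excludes exactly the ragged inputs on which A raises IndexError: A reads mat[i][j] for all
-- j < len(mat), so every row must have at least len(mat) entries.
def Pre_balanceSums (mat : List (List Int)) : Prop := ∀ row ∈ mat, mat.length ≤ row.length
instance (mat : List (List Int)) : Decidable (Pre_balanceSums mat) := by unfold Pre_balanceSums; infer_instance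

def pvWitness_balanceSums : List (List Int) := [[1, 2], [3, 4]]

def Spec_balanceSums (mat : List (List Int)) (out : Int) : Prop := out = balanceSums_alt mat
instance (mat : List (List Int)) (out : Int) : Decidable (Spec_balanceSums mat out) := by unfold Spec_balanceSums; infer_instance

-- ===== CLAIM (what is proved, stated in full; the proofs are below) =====
def Claim_equal_balanceSums : Prop := ∀ (mat : List (List Int)), Dom_balanceSums mat → Pre_balanceSums mat → Spec_balanceSums mat (balanceSums mat)

-- ===== LEMMAS AND PROOFS =====

-- sum of the first n entries of a row (what each of A's inner row loops computes)
def rowS (n : Nat) (row : List Int) : Int := (row.take n).sum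

-- Python's `if s > m then s else m` is `max m s` on Int
lemma if_gt_eq_max (s m : Int) : (if s > m then s else m) = max m s := by
  rcases Int.lt_or_le m s with h | h
  · simp [h, max_eq_right h.le]
  · simp [not_lt.mpr h, max_eq_left h]

lemma inner_row_sum (n : Nat) (row : List Int) (h : n ≤ row.length) :
    (PySem.List.pyRange 0 (n : Int)).foldl
      (fun acc j => acc + PySem.List.pyGetD row j 0) 0 = rowS n row := by
  have hlen : (row.take n).length = n := by simp [h]
  have h1 : (PySem.List.pyRange 0 (n : Int)).foldl
      (fun acc j => acc + PySem.List.pyGetD row j 0) 0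
      = (PySem.List.pyRange 0 (n : Int)).foldl
      (fun acc j => acc + PySem.List.pyGetD (row.take n) j 0) 0 := by
    apply PySem.List.foldl_congr_mem
    intro acc j hj
    rw [PySem.List.mem_pyRange_one] at hj
    rw [PySem.List.pyGetD_of_nonneg _ _ hj.1, PySem.List.pyGetD_of_nonneg _ _ hj.1]
    have hjn : j.toNat < n := by omega
    congr 1
    rw [List.getD_eq_getElem?_getD, List.getD_eq_getElem?_getD, List.getElem?_take_of_lt hjn]
  rw [h1]
  have h2 : ((n : Int)) = ((row.take n).length : Int) := by rw [hlen]
  rw [h2, PySem.List.foldl_pyRange_zero_pyGetD' (row.take n) 0 (fun acc x => acc + x) 0,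
      PySem.List.foldl_add (row.take n) (fun x => x) 0]
  simp [rowS]

-- the fold that B's col component performs, characterised pointwise
lemma col_fold (n : Nat) (rs : List (List Int)) (h : ∀ r ∈ rs, n ≤ r.length)
    (col : List Int) (hc : col.length = n) :
    rs.foldl (fun c row => (c.zip (row.take n)).map (fun p => p.1 + p.2)) col
    = (List.range n).map
        (fun k => col.getD k 0 + (rs.map (fun r => r.getD k 0)).sum) := by
  induction rs generalizing col with
  | nil =>
    simp only [List.foldl_nil, List.map_nil, List.sum_nil, add_zero]
    apply List.ext_getElem (by simp [hc])
    intro k h1 h2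
    simp only [List.getElem_map, List.getElem_range]
    rw [List.getD_eq_getElem col 0 (by omega)]
  | cons row rest ih =>
    have hrow : n ≤ row.length := h row (by simp)
    have hlen : (row.take n).length = n := by simp [hrow]
    set c' := (col.zip (row.take n)).map (fun p => p.1 + p.2) with hc'
    have hc'len : c'.length = n := by simp [hc', hc, hlen]
    rw [List.foldl_cons, ih (fun r hr => h r (by simp [hr])) c' hc'len]
    apply List.map_congr_left
    intro k hk
    rw [List.mem_range] at hk
    have h1 : c'.getD k 0 = col.getD k 0 + row.getD k 0 := by
      rw [List.getD_eq_getElem c' 0 (by omega), List.getD_eq_getElem col 0 (by omega),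
          List.getD_eq_getElem row 0 (by omega)]
      simp only [hc', List.getElem_map, List.getElem_zip, List.getElem_take]
    simp only [List.map_cons, List.sum_cons, h1, add_assoc]

-- B's single pass, split into its three components
lemma b_fold (n : Nat) (rs : List (List Int))
    (col : List Int) (tot best : Int) :
    rs.foldl
      (fun (st : List Int × Int × Int) row =>
        let r := PySem.List.slice row none (some (n : Int))
        let s := r.sum
        ((st.1.zip r).map (fun p => p.1 + p.2), st.2.1 + s,
          if s > st.2.2 then s else st.2.2))
      (col, tot, best)
    = (rs.foldl (fun c row => (c.zip (row.take n)).map (fun p => p.1 + p.2)) col,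
       tot + (rs.map (rowS n)).sum,
       rs.foldl (fun b row => max b (rowS n row)) best) := by
  induction rs generalizing col tot best with
  | nil => simp
  | cons row rest ih =>
    simp only [List.foldl_cons]
    rw [ih]
    simp only [PySem.List.slice_to_natCast]
    simp [rowS, if_gt_eq_max, add_assoc]

lemma foldl_max_init (t : List Int) (a c : Int) :
    t.foldl max (max a c) = max a (t.foldl max c) := by
  induction t generalizing c with
  | nil => rfl
  | cons x xs ih => simp only [List.foldl_cons, max_assoc, ih]

-- ===== VERDICT (by name: the statement is the Claim_ definition above) =====
-- the '0 + (-x)' list-sum fact the closed form needs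
lemma sum_map_neg_list (l : List (List Int)) (f : List Int → Int) :
    (l.map (fun x => -(f x))).sum = -((l.map f).sum) := by
  induction l with
  | nil => simp
  | cons x xs ih => simp [ih]; ring

-- A's third loop in closed form
lemma total_fold (l : List (List Int)) (f : List Int → Int) (target : Int) :
    l.foldl (fun t row => t + (target - f row)) 0
      = (l.length : Int) * target - (l.map f).sum := by
  rw [PySem.List.foldl_add l (fun row => target - f row) 0]
  have h1 : (l.map (fun row => target - f row)).sum
      = (l.map (fun _ => target)).sum + (l.map (fun row => -(f row))).sum := by
    rw [← PySem.List.sum_map_add_int]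
    simp [sub_eq_add_neg]
  rw [h1, PySem.List.sum_map_const_int, sum_map_neg_list]
  ring

-- A's 0-floored column maximum agrees with B's max(col) once joined with the 0-floored row maximum
lemma max_part (n : Nat) (hn : 0 < n) (g : Nat → Int) (b : Int) (hb : 0 ≤ b) :
    max b (((List.range n).map g).foldl max 0)
      = max b ((PySem.List.max? ((List.range n).map g) (fun x => x)).getD 0) := by
  cases n with
  | zero => omega
  | succ m =>
    rw [List.range_succ_eq_map, List.map_cons, PySem.List.max?_id_cons, Option.getD_some,
        List.foldl_cons, foldl_max_init, ← max_assoc, max_eq_left hb]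

theorem balanceSums_spec : Claim_equal_balanceSums := by
  intro mat _hdom hpre
  unfold Spec_balanceSums
  unfold Pre_balanceSums at hpre
  by_cases h0 : mat.length = 0
  · simp [balanceSums, balanceSums_alt, h0]
  · have hn : 0 < mat.length := Nat.pos_of_ne_zero h0
    simp only [balanceSums, balanceSums_alt]
    rw [if_neg h0, if_neg h0]
    rw [b_fold mat.length mat (List.replicate mat.length 0) 0 0,
        col_fold mat.length mat hpre (List.replicate mat.length 0) (by simp)]
    dsimp only
    -- B's column list, simplified
    have hcol : (List.range mat.length).map
          (fun k => (List.replicate mat.length 0).getD k 0 + (mat.map (fun r => r.getD k 0)).sum)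
        = (List.range mat.length).map (fun k => (mat.map (fun r => r.getD k 0)).sum) := by
      apply List.map_congr_left
      intro k _
      simp [List.getD]
    rw [hcol]
    -- each of A's inner row sums
    have hinner : ∀ row ∈ mat,
        List.foldl (fun acc j => acc + PySem.List.pyGetD row j 0) 0
            (PySem.List.pyRange 0 (mat.length : Int)) = rowS mat.length row :=
      fun row hr => inner_row_sum mat.length row (hpre row hr)
    -- A's first loop = B's running row-sum maximum
    have hA1 : List.foldl
        (fun m i =>
          if List.foldl (fun acc j => acc + PySem.List.pyGetD (PySem.List.pyGetD mat i []) j 0) 0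
              (PySem.List.pyRange 0 (mat.length : Int)) > m then
            List.foldl (fun acc j => acc + PySem.List.pyGetD (PySem.List.pyGetD mat i []) j 0) 0
              (PySem.List.pyRange 0 (mat.length : Int))
          else m) 0 (PySem.List.pyRange 0 (mat.length : Int))
        = mat.foldl (fun m row => max m (rowS mat.length row)) 0 := by
      rw [PySem.List.foldl_pyRange_zero_pyGetD' mat []
        (fun m row =>
          if List.foldl (fun acc j => acc + PySem.List.pyGetD row j 0) 0
              (PySem.List.pyRange 0 (mat.length : Int)) > m then
            List.foldl (fun acc j => acc + PySem.List.pyGetD row j 0) 0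
              (PySem.List.pyRange 0 (mat.length : Int))
          else m) 0]
      apply PySem.List.foldl_congr_mem
      intro m row hr
      rw [hinner row hr, if_gt_eq_max]
    -- A's second loop = running maximum over the column sums
    have hA2 : List.foldl
        (fun m j =>
          if List.foldl (fun acc i => acc + PySem.List.pyGetD (PySem.List.pyGetD mat i []) j 0) 0
              (PySem.List.pyRange 0 (mat.length : Int)) > m then
            List.foldl (fun acc i => acc + PySem.List.pyGetD (PySem.List.pyGetD mat i []) j 0) 0
              (PySem.List.pyRange 0 (mat.length : Int))
          else m) 0 (PySem.List.pyRange 0 (mat.length : Int))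
        = ((List.range mat.length).map (fun k => (mat.map (fun r => r.getD k 0)).sum)).foldl max 0 := by
      have hstep : List.foldl
          (fun m j =>
            if List.foldl (fun acc i => acc + PySem.List.pyGetD (PySem.List.pyGetD mat i []) j 0) 0
                (PySem.List.pyRange 0 (mat.length : Int)) > m then
              List.foldl (fun acc i => acc + PySem.List.pyGetD (PySem.List.pyGetD mat i []) j 0) 0
                (PySem.List.pyRange 0 (mat.length : Int))
            else m) 0 (PySem.List.pyRange 0 (mat.length : Int))
          = List.foldl (fun m j => max m ((mat.map (fun r => r.getD j.toNat 0)).sum)) 0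
              (PySem.List.pyRange 0 (mat.length : Int)) := by
        apply PySem.List.foldl_congr_mem
        intro m j hj
        rw [PySem.List.mem_pyRange_one] at hj
        rw [PySem.List.foldl_pyRange_zero_pyGetD' mat []
              (fun acc row => acc + PySem.List.pyGetD row j 0) 0,
            PySem.List.foldl_add mat (fun row => PySem.List.pyGetD row j 0) 0]
        have hmap : mat.map (fun row => PySem.List.pyGetD row j 0)
            = mat.map (fun r => r.getD j.toNat 0) :=
          List.map_congr_left (fun r _ => PySem.List.pyGetD_of_nonneg r 0 hj.1)
        rw [hmap, zero_add, if_gt_eq_max]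
      rw [hstep, PySem.List.pyRange_one 0 (mat.length : Int)]
      simp only [Int.sub_zero, Int.toNat_natCast, zero_add, List.foldl_map]
    -- A's third loop in closed form (for any target)
    have hA3 : ∀ T : Int, List.foldl
        (fun t i =>
          t + (T - List.foldl (fun acc j => acc + PySem.List.pyGetD (PySem.List.pyGetD mat i []) j 0) 0
              (PySem.List.pyRange 0 (mat.length : Int)))) 0
        (PySem.List.pyRange 0 (mat.length : Int))
        = (mat.length : Int) * T - (mat.map (rowS mat.length)).sum := by
      intro T
      rw [PySem.List.foldl_pyRange_zero_pyGetD' mat []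
        (fun t row =>
          t + (T - List.foldl (fun acc j => acc + PySem.List.pyGetD row j 0) 0
              (PySem.List.pyRange 0 (mat.length : Int)))) 0]
      calc mat.foldl (fun t row =>
              t + (T - List.foldl (fun acc j => acc + PySem.List.pyGetD row j 0) 0
                  (PySem.List.pyRange 0 (mat.length : Int)))) 0
          = mat.foldl (fun t row => t + (T - rowS mat.length row)) 0 := by
            apply PySem.List.foldl_congr_mem
            intro t row hr
            rw [hinner row hr]
        _ = (mat.length : Int) * T - (mat.map (rowS mat.length)).sum := total_fold mat (rowS mat.length) T
    rw [hA1, hA2, hA3]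
    -- the two targets coincide
    have hb : (0 : Int) ≤ mat.foldl (fun m row => max m (rowS mat.length row)) 0 :=
      (PySem.List.le_foldl_max_int mat (rowS mat.length) 0).1
    rw [max_part mat.length hn (fun k => (mat.map (fun r => r.getD k 0)).sum) _ hb]
    ring
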